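-- pv_equiv track=rewrite | github.com/WLM1ke/LeetCode | tasks/788_Rotated_Digits.py | rotatedDigits
-- ===== SOURCE A (Python) =====
-- def rotatedDigits(n: int) -> int:
--     bad = {"3", "4", "7"}
--     good = {"2", "5", "6", "9"}
--
--     count = 0
--
--     for num in range(1, n + 1):
--         cur = set(str(num))
--
--         if (not (cur & bad)) and (cur & good):
--             count += 1
--
--     return count
-- ===== SOURCE B (Python) =====
-- def rotatedDigits(n: int) -> int:
--     # Digit DP: numbers in [0, n] using only digits that survive rotation,
--     # minus those using only self-rotating digits {0, 1, 8} (x = 0 cancels).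
--     if n < 0:
--         return 0
--     return _count_le([0, 1, 2, 5, 6, 8, 9], n) - _count_le([0, 1, 8], n)
--
--
-- def _count_le(digs, n):
--     # How many x in [0, n] have every decimal digit in digs (0 is in digs).
--     if n < 0:
--         return 0
--     q, r = divmod(n, 10)
--     full = len(digs) * _count_le(digs, q - 1)
--     partial = sum(1 for d in digs if d <= r) if _all_in(digs, q) else 0
--     return full + partial
--
--
-- def _all_in(digs, q):
--     while q > 0:
--         if q % 10 not in digs:
--             return False
--         q //= 10
--     return True
-- ===== Notes on version B (the rewrite author's own statement) =====
-- stated objective: faster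
-- what changed: Replaced the per-number scan of range(1, n+1) with string digit-set tests by a digit DP: a divmod recursion counting numbers <= n whose digits all lie in a given set, applied to the rotatable digits minus the self-rotating digits.
import Mathlib
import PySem

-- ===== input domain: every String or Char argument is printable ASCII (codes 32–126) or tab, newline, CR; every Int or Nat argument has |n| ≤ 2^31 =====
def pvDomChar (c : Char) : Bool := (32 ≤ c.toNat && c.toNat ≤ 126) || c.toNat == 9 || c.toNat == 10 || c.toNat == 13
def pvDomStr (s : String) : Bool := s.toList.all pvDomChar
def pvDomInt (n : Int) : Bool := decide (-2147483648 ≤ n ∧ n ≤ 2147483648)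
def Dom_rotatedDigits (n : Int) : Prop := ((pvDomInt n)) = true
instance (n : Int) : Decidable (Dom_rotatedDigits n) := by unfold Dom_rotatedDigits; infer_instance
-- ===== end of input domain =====

-- B replaces A's scan of every number in range(1, n+1) by a digit DP (a divmod
-- recursion over the digits of n), an asymptotically faster exact algorithm.

-- ===== PORT A =====
def pvBad : PySem.Set Char := PySem.Set.ofList ['3', '4', '7']
def pvGood : PySem.Set Char := PySem.Set.ofList ['2', '5', '6', '9']

def rotatedDigits (n : Int) : Int :=
  (PySem.List.pyRange 1 (n + 1) 1).foldl
    (fun count num =>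
      let cur : PySem.Set Char := PySem.Set.ofList (PySem.Int.toStr num).toList
      if (PySem.Set.inter cur pvBad = []) ∧ ¬ (PySem.Set.inter cur pvGood = []) then
        count + 1
      else count)
    0

-- ===== PORT B =====
-- while q > 0: if q % 10 not in digs: return False; q //= 10
def pvAllIn (digs : List Int) (q : Int) : Bool :=
  if h : 0 < q then
    if PySem.Int.mod q 10 ∈ digs then pvAllIn digs (PySem.Int.floordiv q 10) else false
  else true
termination_by q.toNat
decreasing_by
  have hd : PySem.Int.floordiv q 10 = q / 10 := PySem.Int.floordiv_eq_ediv_of_pos (by omega)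
  rw [hd]; omega

-- numbers x in [0, n] all of whose decimal digits lie in digs
def pvCountLE (digs : List Int) (n : Int) : Int :=
  if h : n < 0 then 0
  else
    let q := PySem.Int.floordiv n 10
    let r := PySem.Int.mod n 10
    (PySem.List.len digs) * pvCountLE digs (q - 1) +
      (if pvAllIn digs q then ((digs.filter (fun d => d ≤ r)).length : Int) else 0)
termination_by (n + 1).toNat
decreasing_by
  have hd : PySem.Int.floordiv n 10 = n / 10 := PySem.Int.floordiv_eq_ediv_of_pos (by omega)
  simp only [hd]; omega

def rotatedDigits_alt (n : Int) : Int :=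
  if n < 0 then 0
  else pvCountLE [0, 1, 2, 5, 6, 8, 9] n - pvCountLE [0, 1, 8] n

-- ===== PRECONDITION & SPEC =====
def Spec_rotatedDigits (n : Int) (out : Int) : Prop := out = rotatedDigits_alt n
instance (n : Int) (out : Int) : Decidable (Spec_rotatedDigits n out) := by unfold Spec_rotatedDigits; infer_instance

-- ===== CLAIM (what is proved, stated in full; the proofs are below) =====
def Claim_equal_rotatedDigits : Prop := ∀ (n : Int), Dom_rotatedDigits n → Spec_rotatedDigits n (rotatedDigits n)

-- ===== LEMMAS AND PROOFS =====

-- decimal digits of x, least significant first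
def revDigits (x : Nat) : List Nat :=
  if x < 10 then [x] else x % 10 :: revDigits (x / 10)
termination_by x
decreasing_by omega

def allD (P : Nat → Bool) (x : Nat) : Bool := (revDigits x).all P

def Pd (digs : List Int) (d : Nat) : Bool := decide ((d : Int) ∈ digs)

lemma revDigits_lt (x : Nat) : ∀ d ∈ revDigits x, d < 10 := by
  induction x using Nat.strong_induction_on with
  | _ x ih =>
    unfold revDigits
    split
    · intro d hd; simp at hd; omega
    · intro d hd
      rcases List.mem_cons.mp hd with h | h
      · omega
      · exact ih (x / 10) (by omega) d h

lemma allD_small (P : Nat → Bool) (x : Nat) (hx : x < 10) : allD P x = P x := by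
  unfold allD revDigits
  rw [if_pos hx]; simp

lemma allD_split (P : Nat → Bool) (hP0 : P 0 = true) (q r : Nat) (hr : r < 10) :
    allD P (10 * q + r) = (P r && allD P q) := by
  rcases Nat.eq_zero_or_pos q with hq | hq
  · subst hq
    have hz : 10 * 0 + r = r := by omega
    rw [hz, allD_small P r (by omega)]
    have h0 : allD P 0 = true := by rw [allD_small P 0 (by omega)]; exact hP0
    simp [h0]
  · have h1 : (10 * q + r) % 10 = r := by omega
    have h2 : (10 * q + r) / 10 = q := by omega
    have h3 : ¬ (10 * q + r < 10) := by omega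
    conv_lhs => rw [allD, revDigits]
    rw [if_neg h3, h1, h2]
    simp [allD]

lemma countP_or_disjoint {α : Type} (a b : α → Bool) (l : List α)
    (h : ∀ x ∈ l, ¬(a x = true ∧ b x = true)) :
    l.countP (fun x => a x || b x) = l.countP a + l.countP b := by
  induction l with
  | nil => simp
  | cons y t ih =>
    have hy := h y (List.mem_cons_self)
    have ht := ih (fun x hx => h x (List.mem_cons_of_mem y hx))
    by_cases ha : a y = true <;> by_cases hb : b y = true
    · exact absurd ⟨ha, hb⟩ hy
    all_goals simp [List.countP_cons, ha, hb, ht] <;> omega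

lemma countP_eq_single (d : Int) (hd : 0 ≤ d) (t : Nat) :
    (List.range t).countP (fun x : Nat => decide ((x : Int) = d)) = if d < (t : Int) then 1 else 0 := by
  induction t with
  | zero => simp; omega
  | succ t ih =>
    rw [List.range_succ, List.countP_append, ih]
    by_cases h : d < (t : Int)
    · rw [if_pos h, if_pos (by omega)]
      simp only [List.countP_cons, List.countP_nil]
      have : ¬ ((t : Int) = d) := by omega
      simp [this]
    · rw [if_neg h]
      by_cases h2 : (t : Int) = d
      · simp [h2]
      · have : ¬ d < ((t : Nat) + 1 : Int) := by omega
        push_cast at this ⊢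
        simp [h2, this]

lemma cnt (digs : List Int) (hnd : digs.Nodup) (hge : ∀ d ∈ digs, 0 ≤ d) (t : Nat) :
    (List.range t).countP (Pd digs) = (digs.filter (fun d => d < (t : Int))).length := by
  induction digs with
  | nil => simp [Pd]
  | cons d ds ih =>
    have hnd' : ds.Nodup := hnd.of_cons
    have hdm : d ∉ ds := by simp at hnd; exact hnd.1
    have hge' : ∀ x ∈ ds, 0 ≤ x := fun x hx => hge x (List.mem_cons_of_mem d hx)
    have hcongr : ∀ x ∈ List.range t, Pd (d :: ds) x = true ↔
        ((fun x : Nat => decide ((x : Int) = d)) x || Pd ds x) = true := by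
      intro x _; simp [Pd]
    rw [List.countP_congr hcongr,
      countP_or_disjoint _ _ _ (by
        intro x hx hc
        rcases hc with ⟨h1, h2⟩
        simp at h1
        simp [Pd, h1] at h2
        exact hdm h2),
      ih hnd' hge', countP_eq_single d (hge d List.mem_cons_self) t, List.filter_cons]
    by_cases h : d < (t : Int) <;> simp [h] <;> omega

lemma countP_all_lt (digs : List Int) (hnd : digs.Nodup)
    (hlt : ∀ d ∈ digs, 0 ≤ d ∧ d < 10) :
    (List.range 10).countP (Pd digs) = digs.length := by
  rw [cnt digs hnd (fun d hd => (hlt d hd).1) 10]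
  have hself : digs.filter (fun d => d < ((10 : Nat) : Int)) = digs := by
    apply List.filter_eq_self.mpr
    intro d hd
    simp only [decide_eq_true_eq]
    have h2 := (hlt d hd).2
    omega
  rw [hself]

lemma block_count (P : Nat → Bool) (hP0 : P 0 = true) (k : Nat) :
    (List.range (10 * k)).countP (allD P) =
      (List.range k).countP (allD P) * (List.range 10).countP P := by
  induction k with
  | zero => simp
  | succ k ih =>
    have h10 : 10 * (k + 1) = 10 * k + 10 := by ring
    rw [h10, List.range_add, List.countP_append, ih]
    conv_rhs => rw [List.range_succ, List.countP_append]
    have hmap : (List.countP (allD P) (List.map (fun x => 10 * k + x) (List.range 10))) =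
        (List.range 10).countP (fun r => P r && allD P k) := by
      rw [List.countP_map]
      apply List.countP_congr
      intro r hr
      simp only [Function.comp]
      rw [allD_split P hP0 k r (by simp at hr; omega)]
    rw [hmap]
    by_cases hk : allD P k = true
    · have h1 : (List.range 10).countP (fun r => P r && allD P k) = (List.range 10).countP P := by
        apply List.countP_congr; intro r _; simp [hk]
      simp [h1, hk, List.countP_cons]
      ring
    · have h1 : (List.range 10).countP (fun r => P r && allD P k) = 0 := by
        simp only [Bool.not_eq_true] at hk
        simp [List.countP_eq_zero, hk]
      simp only [Bool.not_eq_true] at hk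
      simp [h1, hk, List.countP_cons]

lemma split_count (P : Nat → Bool) (hP0 : P 0 = true) (m : Nat) :
    (List.range (m + 1)).countP (allD P) =
      (List.range (m / 10)).countP (allD P) * (List.range 10).countP P +
        (if allD P (m / 10) then (List.range (m % 10 + 1)).countP P else 0) := by
  have hm : m + 1 = 10 * (m / 10) + (m % 10 + 1) := by omega
  rw [hm, List.range_add, List.countP_append, block_count P hP0]
  congr 1
  rw [List.countP_map]
  have hcg : ∀ r ∈ List.range (m % 10 + 1),
      ((allD P ∘ (fun x => 10 * (m / 10) + x)) r = true ↔ (P r && allD P (m / 10)) = true) := by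
    intro r hr
    simp only [Function.comp]
    rw [allD_split P hP0 (m / 10) r (by simp at hr; omega)]
  rw [List.countP_congr hcg]
  by_cases hk : allD P (m / 10) = true
  · rw [if_pos hk]; apply List.countP_congr; intro r _; simp [hk]
  · rw [if_neg hk]
    simp only [Bool.not_eq_true] at hk
    simp [List.countP_eq_zero, hk]

lemma allIn_eq (digs : List Int) (h0 : (0 : Int) ∈ digs) (q : Nat) :
    pvAllIn digs (q : Nat) = allD (Pd digs) q := by
  induction q using Nat.strong_induction_on with
  | _ q ih =>
    rcases Nat.eq_zero_or_pos q with hq | hq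
    · subst hq
      rw [allD_small _ 0 (by omega)]
      unfold pvAllIn
      simp [Pd, h0]
    · unfold pvAllIn
      rw [dif_pos (by exact_mod_cast hq)]
      have hmod : PySem.Int.mod (q : Int) 10 = ((q % 10 : Nat) : Int) := by
        exact_mod_cast PySem.Int.mod_natCast q 10
      have hdiv : PySem.Int.floordiv (q : Int) 10 = ((q / 10 : Nat) : Int) := by
        exact_mod_cast PySem.Int.floordiv_natCast q 10
      rw [hmod, hdiv]
      by_cases hq10 : q < 10
      · have h1 : q % 10 = q := by omega
        have h2 : q / 10 = 0 := by omega
        rw [h1, h2, allD_small _ q hq10]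
        by_cases hmem : ((q : Int) ∈ digs)
        · rw [if_pos hmem]
          unfold pvAllIn; simp [Pd, hmem]
        · rw [if_neg hmem]; simp [Pd, hmem]
      · have hrec : allD (Pd digs) q = (Pd digs (q % 10) && allD (Pd digs) (q / 10)) := by
          have : q = 10 * (q / 10) + q % 10 := by omega
          conv_lhs => rw [this]
          exact allD_split _ (by simp [Pd, h0]) _ _ (by omega)
        rw [hrec, ← ih (q / 10) (by omega)]
        by_cases hmem : ((q % 10 : Nat) : Int) ∈ digs
        · rw [if_pos hmem]
          have hp : Pd digs (q % 10) = true := by simp [Pd]; exact_mod_cast hmem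
          rw [hp, Bool.true_and]
        · rw [if_neg hmem]
          have hp : Pd digs (q % 10) = false := by simp [Pd]; exact_mod_cast hmem
          rw [hp, Bool.false_and]

lemma toDigitsCore_eq (fuel : Nat) : ∀ (n : Nat) (ds : List Char), n < fuel →
    Nat.toDigitsCore 10 fuel n ds = ((revDigits n).reverse.map Nat.digitChar) ++ ds := by
  induction fuel with
  | zero => intro n ds h; omega
  | succ fuel ih =>
    intro n ds h
    rw [Nat.toDigitsCore]
    by_cases hn : n < 10
    · have h0 : n / 10 = 0 := by omega
      have h1 : n % 10 = n := by omega
      rw [if_pos h0, h1]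
      rw [revDigits, if_pos hn]
      simp
    · have h0 : ¬ (n / 10 = 0) := by omega
      rw [if_neg h0, ih (n / 10) _ (by omega)]
      conv_rhs => rw [revDigits]
      rw [if_neg hn]
      simp

lemma toChars_nat (x : Nat) :
    PySem.Int.toChars (x : Nat) = (revDigits x).reverse.map Nat.digitChar := by
  unfold PySem.Int.toChars
  rw [if_neg (by omega)]
  have hx : ((x : Int)).toNat = x := rfl
  rw [hx, Nat.toDigits, toDigitsCore_eq (x + 1) x [] (by omega)]
  simp

lemma countLE_eq (digs : List Int) (hnd : digs.Nodup)
    (hlt : ∀ d ∈ digs, 0 ≤ d ∧ d < 10) (h0 : (0 : Int) ∈ digs) (m : Nat) :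
    pvCountLE digs (m : Nat) = ((List.range (m + 1)).countP (allD (Pd digs)) : Int) := by
  induction m using Nat.strong_induction_on with
  | _ m ih =>
    have hP0 : Pd digs 0 = true := by simp [Pd]; exact_mod_cast h0
    unfold pvCountLE
    rw [dif_neg (by omega)]
    have hq : PySem.Int.floordiv (m : Nat) 10 = ((m / 10 : Nat) : Int) := by
      exact_mod_cast PySem.Int.floordiv_natCast m 10
    have hr : PySem.Int.mod (m : Nat) 10 = ((m % 10 : Nat) : Int) := by
      exact_mod_cast PySem.Int.mod_natCast m 10
    simp only [hq, hr, PySem.List.len_eq, allIn_eq digs h0 (m / 10)]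
    have hfirst : pvCountLE digs (((m / 10 : Nat) : Int) - 1) =
        ((List.range (m / 10)).countP (allD (Pd digs)) : Int) := by
      rcases Nat.eq_zero_or_pos (m / 10) with hz | hz
      · rw [hz]
        unfold pvCountLE
        rw [dif_pos (by norm_num)]
        simp
      · have hc : (((m / 10 : Nat) : Int) - 1) = ((m / 10 - 1 : Nat) : Int) := by
          push_cast; omega
        rw [hc, ih (m / 10 - 1) (by omega)]
        have : m / 10 - 1 + 1 = m / 10 := by omega
        rw [this]
    have hsecond : ((digs.filter (fun d => d ≤ ((m % 10 : Nat) : Int))).length) =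
        (List.range (m % 10 + 1)).countP (Pd digs) := by
      rw [cnt digs hnd (fun d hd => (hlt d hd).1) (m % 10 + 1)]
      congr 1
      apply List.filter_congr
      intro d _
      simp only [decide_eq_decide]
      push_cast
      omega
    rw [hfirst, split_count (Pd digs) hP0 m, countP_all_lt digs hnd hlt]
    by_cases hk : allD (Pd digs) (m / 10) = true
    · rw [if_pos hk, if_pos hk, hsecond]
      push_cast
      ring
    · rw [if_neg hk, if_neg hk]
      push_cast
      ring

lemma inter_empty_iff (chars : List Char) (t : PySem.Set Char) :
    (PySem.Set.inter (PySem.Set.ofList chars) t = []) ↔ ∀ c ∈ chars, c ∉ t := by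
  rw [List.eq_nil_iff_forall_not_mem]
  constructor
  · intro h c hc hct
    exact h c ((PySem.Set.mem_inter _ _ c).mpr ⟨(PySem.Set.mem_ofList chars c).mpr hc, hct⟩)
  · intro h c hc
    rcases (PySem.Set.mem_inter _ _ c).mp hc with ⟨h1, h2⟩
    exact h c ((PySem.Set.mem_ofList chars c).mp h1) h2

lemma step_iff (x : Nat) :
    ((PySem.Set.inter (PySem.Set.ofList (PySem.Int.toStr (x : Nat)).toList) pvBad = []) ∧
      ¬ (PySem.Set.inter (PySem.Set.ofList (PySem.Int.toStr (x : Nat)).toList) pvGood = []))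
    ↔ (allD (Pd [0, 1, 2, 5, 6, 8, 9]) x = true ∧ allD (Pd [0, 1, 8]) x = false) := by
  have hbadc : ∀ d : Nat, d < 10 →
      ((Nat.digitChar d ∈ (['3', '4', '7'] : List Char)) ↔ ¬ Pd [0, 1, 2, 5, 6, 8, 9] d = true) := by
    decide
  have hgoodc : ∀ d : Nat, d < 10 →
      ((Nat.digitChar d ∈ (['2', '5', '6', '9'] : List Char)) ↔
        (Pd [0, 1, 2, 5, 6, 8, 9] d = true ∧ ¬ Pd [0, 1, 8] d = true)) := by
    decide
  have hchars : (PySem.Int.toStr (x : Nat)).toList = (revDigits x).reverse.map Nat.digitChar := by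
    rw [PySem.Int.toList_toStr, toChars_nat]
  have hmemBad : ∀ c, c ∈ pvBad ↔ c ∈ (['3', '4', '7'] : List Char) := by
    intro c; exact PySem.Set.mem_ofList _ c
  have hmemGood : ∀ c, c ∈ pvGood ↔ c ∈ (['2', '5', '6', '9'] : List Char) := by
    intro c; exact PySem.Set.mem_ofList _ c
  rw [hchars, inter_empty_iff, inter_empty_iff]
  unfold allD
  rw [List.all_eq_true, Bool.eq_false_iff, Ne, List.all_eq_true]
  constructor
  · rintro ⟨hb, hg⟩
    have hall : ∀ d ∈ revDigits x, Pd [0, 1, 2, 5, 6, 8, 9] d = true := by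
      intro d hd
      by_contra hPd
      exact hb (Nat.digitChar d) (by
          refine List.mem_map.mpr ⟨d, List.mem_reverse.mpr hd, rfl⟩)
        ((hmemBad _).mpr ((hbadc d (revDigits_lt x d hd)).mpr hPd))
    refine ⟨hall, fun hPo => hg ?_⟩
    -- from ∀ Po we get: no char of x is a good char
    intro c hc hcg
    rcases List.mem_map.mp hc with ⟨d, hd, rfl⟩
    have hd' := List.mem_reverse.mp hd
    exact ((hgoodc d (revDigits_lt x d hd')).mp ((hmemGood _).mp hcg)).2 (hPo d hd')
  · rintro ⟨ha, ho⟩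
    constructor
    · intro c hc hcb
      rcases List.mem_map.mp hc with ⟨d, hd, rfl⟩
      have hd' := List.mem_reverse.mp hd
      exact (hbadc d (revDigits_lt x d hd')).mp ((hmemBad _).mp hcb) (ha d hd')
    · intro hnone
      apply ho
      intro d hd
      by_contra hPo
      exact hnone (Nat.digitChar d)
        (List.mem_map.mpr ⟨d, List.mem_reverse.mpr hd, rfl⟩)
        ((hmemGood _).mpr ((hgoodc d (revDigits_lt x d hd)).mpr ⟨ha d hd, hPo⟩))

lemma fold_eq (m : Nat) :
    rotatedDigits (m : Nat) =
      ((List.range m).countP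
        (fun k => allD (Pd [0, 1, 2, 5, 6, 8, 9]) (k + 1) && !allD (Pd [0, 1, 8]) (k + 1)) : Int) := by
  induction m with
  | zero =>
    show rotatedDigits ((0 : Nat) : Int) = _
    norm_num [rotatedDigits]
  | succ m ih =>
    unfold rotatedDigits at ih ⊢
    have hcast : ((m + 1 : Nat) : Int) + 1 = ((m : Nat) : Int) + 1 + 1 := by push_cast; ring
    rw [hcast, PySem.List.pyRange_one_succ_right (by omega), List.foldl_append]
    rw [ih]
    have hx : ((m : Nat) : Int) + 1 = ((m + 1 : Nat) : Int) := by push_cast; ring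
    rw [List.range_succ, List.countP_append, hx]
    simp only [List.foldl_cons, List.foldl_nil, List.countP_cons, List.countP_nil]
    by_cases hcond :
        ((PySem.Set.inter (PySem.Set.ofList (PySem.Int.toStr ((m + 1 : Nat) : Int)).toList) pvBad = []) ∧
          ¬ (PySem.Set.inter (PySem.Set.ofList (PySem.Int.toStr ((m + 1 : Nat) : Int)).toList) pvGood = []))
    · rw [if_pos hcond]
      rcases (step_iff (m + 1)).mp hcond with ⟨h1, h2⟩
      simp [h1, h2]
    · rw [if_neg hcond]
      have : ¬ (allD (Pd [0, 1, 2, 5, 6, 8, 9]) (m + 1) = true ∧ allD (Pd [0, 1, 8]) (m + 1) = false) :=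
        fun h => hcond ((step_iff (m + 1)).mpr h)
      by_cases h1 : allD (Pd [0, 1, 2, 5, 6, 8, 9]) (m + 1) = true
      · have h2 : allD (Pd [0, 1, 8]) (m + 1) = true := by
          by_contra h2
          exact this ⟨h1, Bool.eq_false_iff.mpr h2⟩
        simp [h1, h2]
      · simp only [Bool.not_eq_true] at h1
        simp [h1]

lemma countP_sub {α : Type} (a o : α → Bool) (l : List α) (h : ∀ x ∈ l, o x = true → a x = true) :
    ((l.countP (fun x => a x && !o x) : Int)) = (l.countP a : Int) - (l.countP o : Int) := by
  induction l with
  | nil => simp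
  | cons y t ih =>
    have hy := h y (List.mem_cons_self)
    have ht := ih (fun x hx => h x (List.mem_cons_of_mem y hx))
    by_cases ho : o y = true
    · have ha : a y = true := hy ho
      simp [List.countP_cons, ha, ho, ht]
    · by_cases ha : a y = true <;> simp [List.countP_cons, ha, ho, ht] <;> push_cast <;> ring

lemma allD_mono (x : Nat) (h : allD (Pd [0, 1, 8]) x = true) :
    allD (Pd [0, 1, 2, 5, 6, 8, 9]) x = true := by
  unfold allD at h ⊢
  rw [List.all_eq_true] at h ⊢
  intro d hd
  have := h d hd
  simp [Pd] at this ⊢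
  rcases this with h | h | h <;> simp [h]

-- ===== VERDICT (by name: the statement is the Claim_ definition above) =====
theorem rotatedDigits_spec : Claim_equal_rotatedDigits := by
  intro n _
  unfold Spec_rotatedDigits rotatedDigits_alt
  by_cases hn : n < 0
  · rw [if_pos hn]
    unfold rotatedDigits
    have hnil : PySem.List.pyRange 1 (n + 1) 1 = [] := by
      unfold PySem.List.pyRange
      rw [if_neg (by omega), if_pos (by omega), if_neg (by omega)]
      simp
    rw [hnil]
    rfl
  · rw [if_neg hn]
    obtain ⟨m, rfl⟩ : ∃ m : Nat, n = (m : Int) :=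
      ⟨n.toNat, (Int.toNat_of_nonneg (by omega)).symm⟩
    rw [fold_eq m,
      countLE_eq [0, 1, 2, 5, 6, 8, 9] (by decide) (by decide) (by decide) m,
      countLE_eq [0, 1, 8] (by decide) (by decide) (by decide) m,
      ← countP_sub _ _ _ (fun x _ h => allD_mono x h)]
    congr 1
    rw [List.range_succ_eq_map, List.countP_cons, List.countP_map]
    have h0 : (allD (Pd [0, 1, 2, 5, 6, 8, 9]) 0 && !allD (Pd [0, 1, 8]) 0) = false := by
      rw [allD_small (Pd [0, 1, 2, 5, 6, 8, 9]) 0 (by omega), allD_small (Pd [0, 1, 8]) 0 (by omega)]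
      decide
    rw [h0]
    rfl
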